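-- pv_equiv track=rewrite | github.com/mld-0/leetcode | 1043-partition-array-for-max-sum.py | maxSumAfterPartitioning_DP_BottomUp_Optimised
-- ===== SOURCE A (Python) =====
-- from typing import List, Optional
--
-- def maxSumAfterPartitioning_DP_BottomUp_Optimised(arr: List[int], k: int) -> int:
--
--     #   table[i]: answer for arr[:i]
--     #       = max(table[i-j] + max(A[i-1]...A[i-j]) * j) for j = 1..=k
--     table = [ 0 for _ in range(len(arr)+1) ]
--
--     for i in range(1, len(arr)+1):
--         max_in_window = 0
--         for j in range(1, k+1):
--             if i-j < 0 or i-1 < i-j: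
--                 continue
--             max_in_window = max(max_in_window, arr[i-j])
--             trial = table[i-j] + max_in_window * j
--             table[i] = max(table[i], trial)
--
--     return table[-1]
-- ===== SOURCE B (Python) =====
-- from typing import List
--
-- def maxSumAfterPartitioning_DP_BottomUp_Optimised(arr: List[int], k: int) -> int:
--     # Top-down memoized recursion over prefixes: best(i) = answer for arr[:i].
--     n = len(arr)
--     memo = {0: 0}
--
--     def best(i: int) -> int:
--         if i in memo:
--             return memo[i]
--         res = 0
--         w = 0
--         for j in range(1, min(k, i) + 1):
--             w = max(w, arr[i - j])
--             res = max(res, best(i - j) + w * j)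
--         memo[i] = res
--         return res
--
--     return best(n)
-- ===== Notes on version B (the rewrite author's own statement) =====
-- stated objective: alternative
-- what changed: Replaces the bottom-up table loop by a top-down memoized recursion best(i) over prefixes, with the window maximum and the per-node 0-clamp tracked inside each recursive node; the inner range is capped at min(k, i) instead of skipping out-of-range j.
import Mathlib
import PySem

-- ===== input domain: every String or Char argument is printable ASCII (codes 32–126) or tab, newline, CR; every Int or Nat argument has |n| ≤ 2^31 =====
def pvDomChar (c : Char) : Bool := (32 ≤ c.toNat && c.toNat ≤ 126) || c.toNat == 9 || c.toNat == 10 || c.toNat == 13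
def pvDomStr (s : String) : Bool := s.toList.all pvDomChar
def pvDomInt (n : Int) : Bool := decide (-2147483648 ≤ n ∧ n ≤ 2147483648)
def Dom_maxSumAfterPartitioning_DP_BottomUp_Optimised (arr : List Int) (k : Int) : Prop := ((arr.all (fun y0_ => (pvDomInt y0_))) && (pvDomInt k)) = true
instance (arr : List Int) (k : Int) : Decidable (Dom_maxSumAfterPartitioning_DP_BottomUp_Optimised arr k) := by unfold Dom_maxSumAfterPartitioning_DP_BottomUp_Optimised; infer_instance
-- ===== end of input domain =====

-- B replaces A's bottom-up table by a top-down memoized recursion over prefixes (alternative decomposition, same cost).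

-- ===== PORT A =====
-- the inner-loop step of A: state = (max_in_window, table), j the loop variable; i the outer index
def pvAStep (arr : List Int) (i : Int) (st : Int × List Int) (j : Int) : Int × List Int :=
  if i - j < 0 ∨ i - 1 < i - j then st
  else
    let mw := max st.1 (PySem.List.pyGetD arr (i - j) 0)   -- index i-j is in range here (guard)
    let trial := PySem.List.pyGetD st.2 (i - j) 0 + mw * j
    (mw, PySem.List.pySetD st.2 i (max (PySem.List.pyGetD st.2 i 0) trial))

def maxSumAfterPartitioning_DP_BottomUp_Optimised (arr : List Int) (k : Int) : Int :=
  let table : List Int := (List.range (arr.length + 1)).map (fun _ => 0)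
  let table := (PySem.List.pyRange 1 ((arr.length : Int) + 1) 1).foldl
    (fun tb i => ((PySem.List.pyRange 1 (k + 1) 1).foldl (pvAStep arr i) ((0 : Int), tb)).2) table
  PySem.List.pyGetD table (-1) 0

-- ===== PORT B =====
-- best(i) for the prefix arr[:i]; pvAltLoop is best's inner for-loop, j = t+1 running to min(k, i)
mutual
def pvAltGo (arr : List Int) (k : Int) : Nat → Int
  | 0 => 0
  | i + 1 => pvAltLoop arr k i 0 0 0
termination_by n => (n, 1, 0)
decreasing_by exact Prod.Lex.right _ (Prod.Lex.left _ _ (by omega))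
def pvAltLoop (arr : List Int) (k : Int) (i t : Nat) (w res : Int) : Int :=
  if (t : Int) + 1 ≤ min k ((i : Int) + 1) then
    let w' := max w (arr.getD (i - t) 0)   -- index i-t in range whenever i < arr.length
    let res' := max res (pvAltGo arr k (i - t) + w' * ((t : Int) + 1))
    pvAltLoop arr k i (t + 1) w' res'
  else res
termination_by (i + 1, 0, i + 1 - t)
decreasing_by
  · exact Prod.Lex.left _ _ (by omega)
  · exact Prod.Lex.right _ (Prod.Lex.right _ (by omega))
end

def maxSumAfterPartitioning_DP_BottomUp_Optimised_alt (arr : List Int) (k : Int) : Int :=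
  pvAltGo arr k arr.length

-- ===== PRECONDITION & SPEC =====
def Spec_maxSumAfterPartitioning_DP_BottomUp_Optimised (arr : List Int) (k : Int) (out : Int) : Prop := out = maxSumAfterPartitioning_DP_BottomUp_Optimised_alt arr k
instance (arr : List Int) (k : Int) (out : Int) : Decidable (Spec_maxSumAfterPartitioning_DP_BottomUp_Optimised arr k out) := by unfold Spec_maxSumAfterPartitioning_DP_BottomUp_Optimised; infer_instance

-- ===== CLAIM (what is proved, stated in full; the proofs are below) =====
def Claim_equal_maxSumAfterPartitioning_DP_BottomUp_Optimised : Prop := ∀ (arr : List Int) (k : Int), Dom_maxSumAfterPartitioning_DP_BottomUp_Optimised arr k → Spec_maxSumAfterPartitioning_DP_BottomUp_Optimised arr k (maxSumAfterPartitioning_DP_BottomUp_Optimised arr k)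

-- ===== LEMMAS AND PROOFS =====

-- unfolding equations for B's loop
lemma pvAltGo_zero (arr : List Int) (k : Int) : pvAltGo arr k 0 = 0 := by
  rw [pvAltGo]

lemma pvAltGo_succ (arr : List Int) (k : Int) (i : Nat) :
    pvAltGo arr k (i + 1) = pvAltLoop arr k i 0 0 0 := by
  rw [pvAltGo]

lemma pvAltLoop_neg (arr : List Int) (k : Int) (i t : Nat) (w res : Int)
    (h : ¬ ((t : Int) + 1 ≤ min k ((i : Int) + 1))) :
    pvAltLoop arr k i t w res = res := by
  conv_lhs => rw [pvAltLoop]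
  rw [if_neg h]

lemma pvAltLoop_pos (arr : List Int) (k : Int) (i t : Nat) (w res : Int)
    (h : (t : Int) + 1 ≤ min k ((i : Int) + 1)) :
    pvAltLoop arr k i t w res
      = pvAltLoop arr k i (t + 1) (max w (arr.getD (i - t) 0))
          (max res (pvAltGo arr k (i - t) + max w (arr.getD (i - t) 0) * ((t : Int) + 1))) := by
  conv_lhs => rw [pvAltLoop]
  rw [if_pos h]

-- a fold whose step fixes every state is the identity
lemma pv_foldl_id {a b : Type} (l : List b) (g : a -> b -> a) (init : a)
    (h : ∀ s x, x ∈ l → g s x = s) : l.foldl g init = init := by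
  induction l generalizing init with
  | nil => rfl
  | cons y l ih =>
    simp only [List.foldl_cons]
    rw [h init y (by simp)]
    exact ih _ (fun s x hx => h s x (by simp [hx]))

-- A's inner loop, restricted to the active j's, tracks B's loop pvAltLoop step for step
lemma pv_inner_match (arr : List Int) (k : Int) (i' : Nat) (hi : i' < arr.length)
    (tb : List Int) (hlen : tb.length = arr.length + 1)
    (Hf : ∀ m : Nat, m ≤ i' → tb.getD m 0 = pvAltGo arr k m) :
    ∀ (g t : Nat) (w res : Int), (min k ((i' : Int) + 1) - (t : Int)).toNat ≤ g →
      ((PySem.List.pyRange ((t : Int) + 1) (min k ((i' : Int) + 1) + 1) 1).foldl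
          (pvAStep arr ((i' : Int) + 1)) (w, tb.set (i' + 1) res)).2
        = tb.set (i' + 1) (pvAltLoop arr k i' t w res) := by
  intro g
  induction g with
  | zero =>
    intro t w res hg
    rw [PySem.List.pyRange_one_eq_nil (by omega), pvAltLoop_neg arr k i' t w res (by omega)]
    rfl
  | succ g ih =>
    intro t w res hg
    by_cases h : (t : Int) + 1 ≤ min k ((i' : Int) + 1)
    · have ht : t ≤ i' := by omega
      have hl1 : i' + 1 < tb.length := by omega
      rw [PySem.List.pyRange_one_cons (by omega)]
      simp only [List.foldl_cons]
      have h1 : (tb.set (i' + 1) res).getD (i' - t) 0 = pvAltGo arr k (i' - t) := by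
        rw [List.getD_eq_getElem?_getD, List.getElem?_set_ne (by omega),
          ← List.getD_eq_getElem?_getD, Hf (i' - t) (by omega)]
      have h2 : (tb.set (i' + 1) res).getD (i' + 1) 0 = res := by
        simp [List.getD_eq_getElem?_getD, hl1]
      have hstep : pvAStep arr ((i' : Int) + 1) (w, tb.set (i' + 1) res) ((t : Int) + 1)
          = (max w (arr.getD (i' - t) 0),
             tb.set (i' + 1)
               (max res (pvAltGo arr k (i' - t) + max w (arr.getD (i' - t) 0) * ((t : Int) + 1)))) := by
        have hidx : ((i' : Int) + 1 - ((t : Int) + 1)) = ((i' - t : Nat) : Int) := by omega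
        have hidx2 : ((i' : Int) + 1) = ((i' + 1 : Nat) : Int) := by push_cast; ring
        rw [pvAStep, if_neg (by omega), hidx, hidx2]
        simp only [PySem.List.pyGetD_natCast, PySem.List.pySetD_natCast]
        rw [List.set_set, h1, h2]
      rw [hstep]
      have hrange : ((t : Int) + 1 + 1) = (((t + 1 : Nat) : Int) + 1) := by push_cast; ring
      rw [hrange, ih (t + 1) _ _ (by omega), pvAltLoop_pos arr k i' t w res h]
    · rw [PySem.List.pyRange_one_eq_nil (by omega), pvAltLoop_neg arr k i' t w res h]
      rfl

-- A's full inner loop (over range(1, k+1)): the j's beyond i are skipped by the guard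
lemma pv_inner_full (arr : List Int) (k : Int) (i' : Nat) (hi : i' < arr.length)
    (tb : List Int) (hlen : tb.length = arr.length + 1)
    (Hf : ∀ m : Nat, m ≤ i' → tb.getD m 0 = pvAltGo arr k m)
    (htbi : tb.getD (i' + 1) 0 = 0) :
    ((PySem.List.pyRange 1 (k + 1) 1).foldl (pvAStep arr ((i' : Int) + 1)) ((0 : Int), tb)).2
      = tb.set (i' + 1) (pvAltGo arr k (i' + 1)) := by
  have hl1 : i' + 1 < tb.length := by omega
  have hget : tb[i' + 1] = 0 := by
    have h := htbi
    rwa [List.getD_eq_getElem tb 0 hl1] at h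
  have hset : tb.set (i' + 1) (0 : Int) = tb := by
    calc tb.set (i' + 1) (0 : Int) = tb.set (i' + 1) tb[i' + 1] := by rw [hget]
      _ = tb := List.set_getElem_self hl1
  have key : ∀ b : Int, b = min k ((i' : Int) + 1) + 1 →
      ((PySem.List.pyRange 1 b 1).foldl
        (pvAStep arr ((i' : Int) + 1)) ((0 : Int), tb)).2
        = tb.set (i' + 1) (pvAltGo arr k (i' + 1)) := by
    intro b hb
    have := pv_inner_match arr k i' hi tb hlen Hf (min k ((i' : Int) + 1)).toNat 0 0 0 (by omega)
    simp only [Nat.cast_zero, zero_add, hset] at this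
    rw [hb, this, pvAltGo_succ]
  by_cases hk : k ≤ (i' : Int) + 1
  · exact key (k + 1) (by omega)
  · rw [PySem.List.pyRange_one_append 1 ((i' : Int) + 1 + 1) (k + 1) (by omega) (by omega),
      List.foldl_append]
    rw [pv_foldl_id _ _ _ (fun s x hx => by
      rw [pvAStep, if_pos (Or.inl (by
        have := (PySem.List.mem_pyRange_one.mp hx).1
        omega))])]
    exact key ((i' : Int) + 1 + 1) (by omega)

-- the table after the first m outer iterations
def pvT (arr : List Int) (k : Int) (m : Nat) : List Int :=
  (PySem.List.pyRange 1 ((m : Int) + 1) 1).foldl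
    (fun tb i => ((PySem.List.pyRange 1 (k + 1) 1).foldl (pvAStep arr i) ((0 : Int), tb)).2)
    ((List.range (arr.length + 1)).map (fun _ => (0 : Int)))

lemma pvT_succ (arr : List Int) (k : Int) (m : Nat) :
    pvT arr k (m + 1)
      = ((PySem.List.pyRange 1 (k + 1) 1).foldl (pvAStep arr ((m : Int) + 1))
          ((0 : Int), pvT arr k m)).2 := by
  unfold pvT
  rw [show (((m + 1 : Nat) : Int) + 1) = ((m : Int) + 1) + 1 from by push_cast; ring,
    PySem.List.pyRange_one_succ_right (a := 1) (b := (m : Int) + 1) (by omega), List.foldl_append]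
  rfl

lemma pvT_spec (arr : List Int) (k : Int) :
    ∀ m : Nat, m ≤ arr.length →
      (pvT arr k m).length = arr.length + 1 ∧
      ∀ p : Nat, (pvT arr k m).getD p 0 = if p ≤ m then pvAltGo arr k p else 0 := by
  intro m
  induction m with
  | zero =>
    intro _
    have h0 : pvT arr k 0 = (List.range (arr.length + 1)).map (fun _ => (0 : Int)) := by
      unfold pvT
      rw [show ((0 : Nat) : Int) + 1 = 1 from by norm_num, PySem.List.pyRange_one_eq_nil le_rfl]
      rfl
    constructor
    · simp [h0]
    · intro p
      have hz : ((List.range (arr.length + 1)).map (fun _ => (0 : Int))).getD p 0 = 0 := by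
        rw [List.getD_eq_getElem?_getD, List.getElem?_map]
        cases (List.range (arr.length + 1))[p]? <;> simp
      rw [h0, hz]
      split_ifs with hp
      · rw [show p = 0 from by omega, pvAltGo_zero]
      · rfl
  | succ m ih =>
    intro hm
    obtain ⟨hl, hv⟩ := ih (by omega)
    have hm1 : m + 1 < (pvT arr k m).length := by omega
    have hstep : pvT arr k (m + 1) = (pvT arr k m).set (m + 1) (pvAltGo arr k (m + 1)) := by
      rw [pvT_succ]
      exact pv_inner_full arr k m (by omega) (pvT arr k m) hl
        (fun mm hmm => by rw [hv mm, if_pos hmm])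
        (by rw [hv (m + 1), if_neg (by omega)])
    constructor
    · rw [hstep, List.length_set, hl]
    · intro p
      rw [hstep]
      by_cases hp : p = m + 1
      · subst hp
        rw [List.getD_eq_getElem?_getD]
        simp [hm1]
      · rw [List.getD_eq_getElem?_getD, List.getElem?_set_ne (by omega),
          ← List.getD_eq_getElem?_getD, hv p]
        split_ifs with h1 h2 h2 <;> first | rfl | omega

-- ===== VERDICT (by name: the statement is the Claim_ definition above) =====
theorem maxSumAfterPartitioning_DP_BottomUp_Optimised_spec : Claim_equal_maxSumAfterPartitioning_DP_BottomUp_Optimised := by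
  intro arr k _
  unfold Spec_maxSumAfterPartitioning_DP_BottomUp_Optimised
  obtain ⟨hl, hv⟩ := pvT_spec arr k arr.length le_rfl
  have hA : maxSumAfterPartitioning_DP_BottomUp_Optimised arr k
      = PySem.List.pyGetD (pvT arr k arr.length) (-1) 0 := rfl
  rw [hA, PySem.List.pyGetD_neg_ofNat _ 1 0 (by omega) (by omega)]
  have hfin : (pvT arr k arr.length).length - 1 = arr.length := by omega
  rw [maxSumAfterPartitioning_DP_BottomUp_Optimised_alt]
  rw [show (pvT arr k arr.length)[(pvT arr k arr.length).length - 1] = (pvT arr k arr.length)[arr.length]'(by omega) from by congr 1]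
  rw [← List.getD_eq_getElem (pvT arr k arr.length) 0 (by omega), hv arr.length, if_pos le_rfl]
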